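-- pv_equiv track=rewrite | github.com/Prasanna-Nadrajan/Hacker-Rank-Problem-Solving | two_charac.py | check
-- ===== SOURCE A (Python) =====
-- def check(st):
--     if(len(set(st))!=2):
--         return False
--     else:
--         if(len(st)%2!=0):
--             if(st[0]==st[-1]):
--                 if(st[1]==st[-2]):
--                     for i in range(2,len(st)):
--                         if(st[i]!=st[i-2] or st[i]==st[i-1]):
--                             return False
--                 else:
--                     return False
--             else:
--                 return False
--         else:
--             for i in range(len(st)):
--                 if(st[i]!=st[i-2] or st[i]==st[i-1]):
--                     return False
--         return True
-- ===== SOURCE B (Python) =====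
-- def check(st):
--     return len(set(st)) == 2 and all(x != y for x, y in zip(st, st[1:]))
-- ===== Notes on version B (the rewrite author's own statement) =====
-- stated objective: simpler
-- what changed: Replaces the parity-branched index scan with wraparound negative indexing and boundary special cases by a single pairwise pass: exactly two distinct characters plus all adjacent characters different is equivalent to the alternating two-char pattern.
import Mathlib
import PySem

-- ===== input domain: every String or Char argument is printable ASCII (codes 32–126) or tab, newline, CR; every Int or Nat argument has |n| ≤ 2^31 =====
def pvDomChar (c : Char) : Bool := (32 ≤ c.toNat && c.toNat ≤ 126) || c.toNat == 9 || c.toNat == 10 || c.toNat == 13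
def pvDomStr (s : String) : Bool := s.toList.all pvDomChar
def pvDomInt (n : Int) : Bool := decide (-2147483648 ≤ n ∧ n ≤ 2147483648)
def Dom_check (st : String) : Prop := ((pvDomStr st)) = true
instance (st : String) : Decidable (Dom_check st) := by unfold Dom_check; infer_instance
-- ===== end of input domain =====

-- B replaces A's parity-branched wraparound index scan by one pairwise adjacent-difference pass (simpler).

-- ===== PORT A =====
-- all indexed accesses happen only under len(set(st)) == 2, so every index is in range;
-- pyGetD is the total form of Python's st[i] (negative indices count from the end), exact here.
def check (st : String) : Bool :=
  let l := st.toList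
  if (PySem.Set.ofList l).length ≠ 2 then false
  else
    if l.length % 2 ≠ 0 then
      if PySem.List.pyGetD l 0 ' ' == PySem.List.pyGetD l (-1) ' ' then
        if PySem.List.pyGetD l 1 ' ' == PySem.List.pyGetD l (-2) ' ' then
          -- for i in range(2, len(st)): early return False = .all of the negated test
          (PySem.List.pyRange 2 l.length 1).all (fun i =>
            !((PySem.List.pyGetD l i ' ' != PySem.List.pyGetD l (i-2) ' ') ||
              (PySem.List.pyGetD l i ' ' == PySem.List.pyGetD l (i-1) ' ')))
        else false
      else false
    else
      (PySem.List.pyRange 0 l.length 1).all (fun i =>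
        !((PySem.List.pyGetD l i ' ' != PySem.List.pyGetD l (i-2) ' ') ||
          (PySem.List.pyGetD l i ' ' == PySem.List.pyGetD l (i-1) ' ')))

-- ===== PORT B =====
-- zip(st, st[1:]) = l.zip (slice l 1 none); all(x != y …) = .all
def check_alt (st : String) : Bool :=
  let l := st.toList
  (PySem.Set.ofList l).length == 2 &&
    (l.zip (PySem.List.slice l (some 1) none)).all (fun p => p.1 != p.2)

-- ===== PRECONDITION & SPEC =====
def Spec_check (st : String) (out : Bool) : Prop := out = check_alt st
instance (st : String) (out : Bool) : Decidable (Spec_check st out) := by unfold Spec_check; infer_instance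

-- ===== CLAIM (what is proved, stated in full; the proofs are below) =====
def Claim_equal_check : Prop := ∀ (st : String), Dom_check st → Spec_check st (check st)

-- ===== LEMMAS AND PROOFS =====

def GAlt (l : List Char) : Prop := ∀ i : Nat, ∀ (h : i + 1 < l.length), l[i] ≠ l[i+1]

-- range-loop with early return False = all indices pass
theorem allRange_iff (a b : Int) (p : Int → Bool) :
    ((PySem.List.pyRange a b 1).all p = true) ↔ ∀ i : Int, a ≤ i → i < b → p i = true := by
  simp [List.all_eq_true, PySem.List.mem_pyRange_one]

theorem zipAll_iff (l : List Char) :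
    ((l.zip (PySem.List.slice l (some 1) none)).all (fun p => p.1 != p.2) = true) ↔ GAlt l := by
  rw [PySem.List.slice_from_one]
  constructor
  · intro h i hi
    have hm : (l[i], l[i+1]) ∈ l.zip l.tail := by
      have : (l.zip l.tail)[i]'(by simp [List.length_zip, List.length_tail]; omega) = (l[i], l.tail[i]'(by simp [List.length_tail]; omega)) := List.getElem_zip
      rw [List.getElem_tail] at this
      exact this ▸ List.getElem_mem _
    have := List.all_eq_true.mp h _ hm
    simpa using this
  · intro h
    rw [List.all_eq_true]
    rintro ⟨x, y⟩ hm
    obtain ⟨i, hi, hget⟩ := List.mem_iff_getElem.mp hm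
    rw [List.getElem_zip] at hget
    simp only [List.length_zip, List.length_tail] at hi
    have h1 : l.tail[i]'(by simp [List.length_tail]; omega) = l[i+1]'(by omega) := List.getElem_tail ..
    have := h i (by omega)
    simp only [Prod.mk.injEq] at hget
    simp only [bne_iff_ne, ne_eq]
    rw [← hget.1, ← hget.2, h1]
    exact this

theorem tri {a b c d e : Char} (hab : a ≠ b) (hc : c = a ∨ c = b) (hd : d = a ∨ d = b)
    (he : e = a ∨ e = b) (hcd : c ≠ d) (hed : e ≠ d) : c = e := by
  rcases hc with rfl | rfl <;> rcases hd with rfl | rfl <;> rcases he with rfl | rfl <;> tauto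

theorem period {l : List Char} {a b : Char} (hab : a ≠ b) (hsub : ∀ c ∈ l, c = a ∨ c = b)
    (hAlt : GAlt l) : ∀ i : Nat, ∀ (h : i + 2 < l.length), l[i+2] = l[i]'(by omega) := by
  intro i h
  exact (tri hab (hsub _ (List.getElem_mem _)) (hsub _ (List.getElem_mem (n := i+1) (by omega)))
    (hsub _ (List.getElem_mem _)) (hAlt i (by omega)) ((by have := hAlt (i+1) (by omega); simpa using this.symm))).symm

theorem parity {l : List Char} {a b : Char} (hab : a ≠ b) (hsub : ∀ c ∈ l, c = a ∨ c = b)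
    (hAlt : GAlt l) (h2 : 2 ≤ l.length) :
    ∀ i : Nat, ∀ (h : i < l.length), l[i] = l[i % 2]'(by omega) := by
  intro i
  induction i using Nat.strong_induction_on with
  | _ i ih =>
    intro h
    match i with
    | 0 => rfl
    | 1 => rfl
    | (j+2) =>
      rw [period hab hsub hAlt j h, ih j (by omega) (by omega)]
      congr 1
      omega

theorem two_chars {l : List Char} (hk : (PySem.Set.ofList l).length = 2) :
    ∃ a b : Char, a ≠ b ∧ (∀ c ∈ l, c = a ∨ c = b) ∧ 2 ≤ l.length := by
  obtain ⟨a, b, hab'⟩ := List.length_eq_two.mp hk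
  have hnd := PySem.Set.nodup_ofList (xs := l)
  rw [hab'] at hnd
  have hab : a ≠ b := by simpa using hnd
  have hsub : ∀ c ∈ l, c = a ∨ c = b := by
    intro c hc
    have : c ∈ PySem.Set.ofList l := (PySem.Set.mem_ofList l c).mpr hc
    rw [hab'] at this
    simpa using this
  have ha : a ∈ l := (PySem.Set.mem_ofList l _).mp (by rw [hab']; simp)
  have hb : b ∈ l := (PySem.Set.mem_ofList l _).mp (by rw [hab']; simp)
  refine ⟨a, b, hab, hsub, ?_⟩
  match l, ha, hb with
  | [x], ha, hb => exact absurd ((List.mem_singleton.mp ha).trans (List.mem_singleton.mp hb).symm) hab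
  | x :: y :: t, _, _ => simp [List.length_cons]

theorem gix {l : List Char} {i j : Nat} (h : i = j) (hi : i < l.length) :
    l[i] = l[j]'(h ▸ hi) := by subst h; rfl

theorem evenLoop_iff {l : List Char} {a b : Char} (hab : a ≠ b) (hsub : ∀ c ∈ l, c = a ∨ c = b)
    (h2 : 2 ≤ l.length) (hev : l.length % 2 = 0) :
    ((PySem.List.pyRange 0 (l.length : Int) 1).all (fun i =>
        !((PySem.List.pyGetD l i ' ' != PySem.List.pyGetD l (i-2) ' ') ||
          (PySem.List.pyGetD l i ' ' == PySem.List.pyGetD l (i-1) ' '))) = true) ↔ GAlt l := by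
  rw [allRange_iff]
  constructor
  · intro h i hi
    have := h ((i+1 : Nat) : Int) (by positivity) (by exact_mod_cast hi)
    have e1 : ((i+1 : Nat) : Int) - 1 = ((i : Nat) : Int) := by push_cast; ring
    rw [e1] at this
    simp only [Bool.not_eq_true', Bool.or_eq_false_iff, beq_eq_false_iff_ne, ne_eq,
      PySem.List.pyGetD_natCast] at this
    have h3 := this.2
    rw [List.getD_eq_getElem l ' ' (by omega), List.getD_eq_getElem l ' ' (by omega)] at h3
    exact fun he => h3 he.symm
  · intro hAlt i h0 hn
    lift i to ℕ using h0 with k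
    have hkn : k < l.length := by exact_mod_cast hn
    simp only [Bool.not_eq_true', Bool.or_eq_false_iff, bne_eq_false_iff_eq, beq_eq_false_iff_ne, ne_eq]
    match k, hkn with
    | 0, _ =>
      rw [show ((0:Nat):Int) - 2 = -2 by ring, show ((0:Nat):Int) - 1 = -1 by ring,
        PySem.List.pyGetD_neg_ofNat l 2 ' ' (by omega) (by omega),
        PySem.List.pyGetD_neg_ofNat l 1 ' ' (by omega) (by omega)]
      simp only [PySem.List.pyGetD_natCast, List.getD_eq_getElem l ' ' (show 0 < l.length by omega)]
      have p1 := (parity hab hsub hAlt h2 (l.length - 2) (by omega)).trans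
        (gix (show (l.length - 2) % 2 = 0 by omega) (by omega))
      have p2 := (parity hab hsub hAlt h2 (l.length - 1) (by omega)).trans
        (gix (show (l.length - 1) % 2 = 1 by omega) (by omega))
      exact ⟨p1.symm, by rw [p2]; exact hAlt 0 (by omega)⟩
    | 1, _ =>
      rw [show ((1:Nat):Int) - 2 = -1 by ring, show ((1:Nat):Int) - 1 = ((0:Nat):Int) by ring,
        PySem.List.pyGetD_neg_ofNat l 1 ' ' (by omega) (by omega)]
      simp only [PySem.List.pyGetD_natCast, List.getD_eq_getElem l ' ' (show 1 < l.length by omega),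
        List.getD_eq_getElem l ' ' (show 0 < l.length by omega)]
      have p2 := (parity hab hsub hAlt h2 (l.length - 1) (by omega)).trans
        (gix (show (l.length - 1) % 2 = 1 by omega) (by omega))
      exact ⟨p2.symm, fun he => (hAlt 0 (by omega)) he.symm⟩
    | (j+2), hkn =>
      rw [show ((j+2 : Nat):Int) - 2 = ((j : Nat) : Int) by push_cast; ring,
        show ((j+2 : Nat):Int) - 1 = ((j+1 : Nat) : Int) by push_cast; ring]
      simp only [PySem.List.pyGetD_natCast,
        List.getD_eq_getElem l ' ' hkn, List.getD_eq_getElem l ' ' (show j < l.length by omega),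
        List.getD_eq_getElem l ' ' (show j+1 < l.length by omega)]
      exact ⟨period hab hsub hAlt j hkn, fun he => (hAlt (j+1) (by omega)) he.symm⟩

theorem oddBranch_iff {l : List Char} {a b : Char} (hab : a ≠ b) (hsub : ∀ c ∈ l, c = a ∨ c = b)
    (h2 : 2 ≤ l.length) (hodd : l.length % 2 = 1) :
    ((if PySem.List.pyGetD l 0 ' ' == PySem.List.pyGetD l (-1) ' ' then
        if PySem.List.pyGetD l 1 ' ' == PySem.List.pyGetD l (-2) ' ' then
          (PySem.List.pyRange 2 (l.length : Int) 1).all (fun i =>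
            !((PySem.List.pyGetD l i ' ' != PySem.List.pyGetD l (i-2) ' ') ||
              (PySem.List.pyGetD l i ' ' == PySem.List.pyGetD l (i-1) ' ')))
        else false
      else false) = true) ↔ GAlt l := by
  have h3 : 3 ≤ l.length := by omega
  rw [PySem.List.pyGetD_neg_ofNat l 1 ' ' (by omega) (by omega),
    PySem.List.pyGetD_neg_ofNat l 2 ' ' (by omega) (by omega)]
  have g0 : PySem.List.pyGetD l 0 ' ' = l[0]'(by omega) := by
    simpa using PySem.List.pyGetD_eq_getElem l (i := 0) ' ' (by norm_num) (by exact_mod_cast (by omega : 0 < l.length))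
  have g1 : PySem.List.pyGetD l 1 ' ' = l[1]'(by omega) := by
    simpa using PySem.List.pyGetD_eq_getElem l (i := 1) ' ' (by norm_num) (by exact_mod_cast (by omega : 1 < l.length))
  rw [g0, g1]
  constructor
  · intro h
    split_ifs at h with hc1 hc2
    · rw [allRange_iff] at h
      have hc1' : l[0] = l[l.length - 1] := by exact_mod_cast beq_iff_eq.mp hc1
      have hc2' : l[1] = l[l.length - 2] := by exact_mod_cast beq_iff_eq.mp hc2
      intro i hi
      match i with
      | 0 =>
        have hl := h ((l.length - 1 : Nat) : Int) (by exact_mod_cast by omega) (by exact_mod_cast by omega)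
        have e1 : ((l.length - 1 : Nat) : Int) - 1 = ((l.length - 2 : Nat) : Int) := by push_cast [h2]; ring_nf; omega
        rw [e1] at hl
        simp only [Bool.not_eq_true', Bool.or_eq_false_iff, beq_eq_false_iff_ne, ne_eq,
          PySem.List.pyGetD_natCast] at hl
        have := hl.2
        rw [List.getD_eq_getElem l ' ' (by omega), List.getD_eq_getElem l ' ' (by omega)] at this
        show l[0] ≠ l[1]
        exact fun he => this (hc1'.symm.trans (he.trans hc2'))
      | (j+1) =>
        have hl := h ((j+2 : Nat) : Int) (by exact_mod_cast by omega) (by exact_mod_cast by omega)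
        have e1 : ((j+2 : Nat) : Int) - 1 = ((j+1 : Nat) : Int) := by push_cast; ring
        rw [e1] at hl
        simp only [Bool.not_eq_true', Bool.or_eq_false_iff, beq_eq_false_iff_ne, ne_eq,
          PySem.List.pyGetD_natCast] at hl
        have := hl.2
        rw [List.getD_eq_getElem l ' ' (by omega), List.getD_eq_getElem l ' ' (by omega)] at this
        exact fun he => this (he.symm)
  · intro hAlt
    have p1 := (parity hab hsub hAlt h2 (l.length - 1) (by omega)).trans
      (gix (show (l.length - 1) % 2 = 0 by omega) (by omega))
    have p2 := (parity hab hsub hAlt h2 (l.length - 2) (by omega)).trans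
      (gix (show (l.length - 2) % 2 = 1 by omega) (by omega))
    rw [if_pos (by exact beq_iff_eq.mpr p1.symm), if_pos (by exact beq_iff_eq.mpr p2.symm)]
    rw [allRange_iff]
    intro i h0 hn
    have hk2 : (2:Int) ≤ i := h0
    lift i to ℕ using (by omega : (0:Int) ≤ i) with k
    have hkn : k < l.length := by exact_mod_cast hn
    have hk2' : 2 ≤ k := by exact_mod_cast hk2
    obtain ⟨j, rfl⟩ : ∃ j, k = j + 2 := ⟨k - 2, by omega⟩
    simp only [Bool.not_eq_true', Bool.or_eq_false_iff, bne_eq_false_iff_eq, beq_eq_false_iff_ne, ne_eq]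
    rw [show ((j+2 : Nat):Int) - 2 = ((j : Nat) : Int) by push_cast; ring,
      show ((j+2 : Nat):Int) - 1 = ((j+1 : Nat) : Int) by push_cast; ring]
    simp only [PySem.List.pyGetD_natCast,
      List.getD_eq_getElem l ' ' hkn, List.getD_eq_getElem l ' ' (show j < l.length by omega),
      List.getD_eq_getElem l ' ' (show j+1 < l.length by omega)]
    exact ⟨period hab hsub hAlt j hkn, fun he => (hAlt (j+1) (by omega)) he.symm⟩

theorem check_key (l : List Char) :
    (if (PySem.Set.ofList l).length ≠ 2 then false
     else
       if l.length % 2 ≠ 0 then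
         if PySem.List.pyGetD l 0 ' ' == PySem.List.pyGetD l (-1) ' ' then
           if PySem.List.pyGetD l 1 ' ' == PySem.List.pyGetD l (-2) ' ' then
             (PySem.List.pyRange 2 l.length 1).all (fun i =>
               !((PySem.List.pyGetD l i ' ' != PySem.List.pyGetD l (i-2) ' ') ||
                 (PySem.List.pyGetD l i ' ' == PySem.List.pyGetD l (i-1) ' ')))
           else false
         else false
       else
         (PySem.List.pyRange 0 l.length 1).all (fun i =>
           !((PySem.List.pyGetD l i ' ' != PySem.List.pyGetD l (i-2) ' ') ||
             (PySem.List.pyGetD l i ' ' == PySem.List.pyGetD l (i-1) ' ')))) =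
    (((PySem.Set.ofList l).length == 2) &&
      (l.zip (PySem.List.slice l (some 1) none)).all (fun p => p.1 != p.2)) := by
  by_cases hk : (PySem.Set.ofList l).length = 2
  · rw [if_neg (by omega)]
    obtain ⟨a, b, hab, hsub, h2⟩ := two_chars hk
    have hB : ((((PySem.Set.ofList l).length == 2) &&
        (l.zip (PySem.List.slice l (some 1) none)).all (fun p => p.1 != p.2)) = true) ↔ GAlt l := by
      rw [Bool.and_eq_true, zipAll_iff]
      simp [hk]
    rw [Bool.eq_iff_iff, hB]
    by_cases ho : l.length % 2 = 0
    · rw [if_neg (by omega)]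
      exact evenLoop_iff hab hsub h2 ho
    · rw [if_pos (by omega)]
      exact oddBranch_iff hab hsub h2 (by omega)
  · rw [if_pos hk]
    symm
    simp only [Bool.and_eq_false_iff]
    left
    exact beq_eq_false_iff_ne.mpr hk

-- ===== VERDICT (by name: the statement is the Claim_ definition above) =====
theorem check_spec : Claim_equal_check := by
  intro st _
  show check st = check_alt st
  unfold check check_alt
  exact check_key st.toList
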